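-- pv_equiv track=rewrite | github.com/pypi-data/pypi-mirror-117 | packages/vltk/vltk-1.0.4.tar.gz/vltk-1.0.4/vltk/utils/adapters.py | expand_with_tokenized_sequence
-- ===== SOURCE A (Python) =====
-- def expand_with_tokenized_sequence(tensor, nested_tokens, max_len):
--     assert len(tensor) == len(nested_tokens)
--     expanded_sequence = []
--     total_len = 0
--     for t_i, nt_i in zip(tensor, nested_tokens):
--         length_nt_i = len(nt_i)
--         if total_len + length_nt_i > max_len:
--             break
--         expanded_sequence.extend([t_i] * length_nt_i)
--         total_len += length_nt_i
--     return expanded_sequence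
-- ===== SOURCE B (Python) =====
-- from itertools import accumulate, chain, repeat
-- from bisect import bisect_right
--
--
-- def expand_with_tokenized_sequence(tensor, nested_tokens, max_len):
--     assert len(tensor) == len(nested_tokens)
--     lens = [len(nt) for nt in nested_tokens]
--     csums = list(accumulate(lens))
--     k = bisect_right(csums, max_len)
--     return list(chain.from_iterable(repeat(t, n) for t, n in zip(tensor[:k], lens[:k])))
-- ===== Notes on version B (the rewrite author's own statement) =====
-- stated objective: alternative
-- what changed: A's single interleaved accumulate-and-extend loop with a break is replaced by a two-pass shape: build the per-item length prefix sums, find the cutoff k with bisect_right, then flatten the first k items with itertools.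
import Mathlib
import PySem

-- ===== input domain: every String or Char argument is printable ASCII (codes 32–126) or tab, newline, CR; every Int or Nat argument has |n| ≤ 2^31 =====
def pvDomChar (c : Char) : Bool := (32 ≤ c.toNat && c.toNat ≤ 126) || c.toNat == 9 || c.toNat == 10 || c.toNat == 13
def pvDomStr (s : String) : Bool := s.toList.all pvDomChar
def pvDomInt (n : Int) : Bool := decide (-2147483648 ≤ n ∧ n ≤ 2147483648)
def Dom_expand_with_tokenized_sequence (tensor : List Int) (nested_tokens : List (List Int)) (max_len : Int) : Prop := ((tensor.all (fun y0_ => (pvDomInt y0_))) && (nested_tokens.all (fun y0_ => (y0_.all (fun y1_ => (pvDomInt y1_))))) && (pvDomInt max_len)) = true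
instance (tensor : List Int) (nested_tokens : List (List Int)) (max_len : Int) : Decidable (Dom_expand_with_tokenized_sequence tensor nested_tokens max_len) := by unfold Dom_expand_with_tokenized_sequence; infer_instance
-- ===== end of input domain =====

-- ===== PORT A =====
-- B restructures A's interleaved accumulate-and-extend loop into prefix sums + bisect cutoff + flatten (objective: alternative).
-- Equivalence is proved for inputs with len(tensor) == len(nested_tokens) (A's assert raises otherwise).

-- the for-loop of A: state = (expanded so far is the accumulator via ++, total_len); break returns []
def ewtsLoopA (max_len : Int) : List (Int × List Int) → Int → List Int
  | [], _ => []
  | (t_i, nt_i) :: rest, total_len =>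
    let length_nt_i : Int := (nt_i.length : Int)
    if total_len + length_nt_i > max_len then []
    else List.replicate nt_i.length t_i ++ ewtsLoopA max_len rest (total_len + length_nt_i)

def expand_with_tokenized_sequence (tensor : List Int) (nested_tokens : List (List Int)) (max_len : Int) : List Int :=
  ewtsLoopA max_len (tensor.zip nested_tokens) 0

-- ===== PORT B =====
-- itertools.accumulate on the lengths
def ewtsCsum : List Nat → Int → List Int
  | [], _ => []
  | n :: rest, acc => (acc + n) :: ewtsCsum rest (acc + n)

def expand_with_tokenized_sequence_alt (tensor : List Int) (nested_tokens : List (List Int)) (max_len : Int) : List Int :=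
  let lens := nested_tokens.map (·.length)
  let csums := ewtsCsum lens 0
  -- bisect_right on the nondecreasing list csums = number of leading entries ≤ max_len (exact here: csums is sorted)
  let k := (csums.takeWhile (fun c => c ≤ max_len)).length
  (((tensor.take k).zip (lens.take k)).map (fun p => List.replicate p.2 p.1)).flatten

-- ===== PRECONDITION & SPEC =====
-- Pre_ excludes exactly the inputs on which A's assert raises AssertionError (B asserts the same).
def Pre_expand_with_tokenized_sequence (tensor : List Int) (nested_tokens : List (List Int)) (max_len : Int) : Prop :=
  tensor.length = nested_tokens.length
instance (tensor : List Int) (nested_tokens : List (List Int)) (max_len : Int) : Decidable (Pre_expand_with_tokenized_sequence tensor nested_tokens max_len) := by unfold Pre_expand_with_tokenized_sequence; infer_instance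
def pvWitness_expand_with_tokenized_sequence : List Int × List (List Int) × Int := ([3, 7], [[1, 2], [4]], 5)
def Spec_expand_with_tokenized_sequence (tensor : List Int) (nested_tokens : List (List Int)) (max_len : Int) (out : List Int) : Prop := out = expand_with_tokenized_sequence_alt tensor nested_tokens max_len
instance (tensor : List Int) (nested_tokens : List (List Int)) (max_len : Int) (out : List Int) : Decidable (Spec_expand_with_tokenized_sequence tensor nested_tokens max_len out) := by unfold Spec_expand_with_tokenized_sequence; infer_instance

-- ===== CLAIM (what is proved, stated in full; the proofs are below) =====
def Claim_equal_expand_with_tokenized_sequence : Prop := ∀ (tensor : List Int) (nested_tokens : List (List Int)) (max_len : Int), Dom_expand_with_tokenized_sequence tensor nested_tokens max_len → Pre_expand_with_tokenized_sequence tensor nested_tokens max_len → Spec_expand_with_tokenized_sequence tensor nested_tokens max_len (expand_with_tokenized_sequence tensor nested_tokens max_len)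

-- ===== LEMMAS AND PROOFS =====

-- common reference: remaining-budget recursion
def ewtsRef : List Int → List (List Int) → Int → List Int
  | t :: ts, nt :: nts, m =>
    if (nt.length : Int) ≤ m then List.replicate nt.length t ++ ewtsRef ts nts (m - nt.length)
    else []
  | _, _, _ => []

theorem ewtsLoopA_eq_ref (ts : List Int) (nts : List (List Int)) (m total : Int) :
    ewtsLoopA m (ts.zip nts) total = ewtsRef ts nts (m - total) := by
  induction ts generalizing nts total with
  | nil => cases nts <;> simp [ewtsLoopA, ewtsRef]
  | cons t ts ih =>
    cases nts with
    | nil => simp [ewtsLoopA, ewtsRef]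
    | cons nt nts =>
      simp only [List.zip_cons_cons, ewtsLoopA, ewtsRef]
      by_cases h : (nt.length : Int) ≤ m - total
      · rw [if_neg (by omega), if_pos h, ih,
          show m - (total + (nt.length : Int)) = m - total - nt.length by ring]
      · rw [if_pos (by omega), if_neg h]

theorem ewtsCut_eq (lens : List Nat) (acc m : Int) :
    ((ewtsCsum lens acc).takeWhile (fun c => c ≤ m)).length =
      ((ewtsCsum lens 0).takeWhile (fun c => c ≤ m - acc)).length := by
  induction lens generalizing acc m with
  | nil => simp [ewtsCsum]
  | cons n rest ih =>
    simp only [ewtsCsum, List.takeWhile, zero_add]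
    by_cases h : acc + (n : Int) ≤ m
    · rw [show (decide (acc + (n:Int) ≤ m)) = true by simpa using h,
          show (decide ((n:Int) ≤ m - acc)) = true by simp; omega]
      simp only [List.length_cons]
      rw [ih (acc + n) m, ih n (m - acc),
        show m - (acc + (n:Int)) = m - acc - n by ring]
    · rw [show (decide (acc + (n:Int) ≤ m)) = false by simpa using h,
          show (decide ((n:Int) ≤ m - acc)) = false by simp; omega]

theorem ewtsAlt_eq_ref (ts : List Int) (nts : List (List Int)) (m : Int) :
    expand_with_tokenized_sequence_alt ts nts m = ewtsRef ts nts m := by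
  induction ts generalizing nts m with
  | nil => cases nts <;> simp [expand_with_tokenized_sequence_alt, ewtsCsum, ewtsRef]
  | cons t ts ih =>
    cases nts with
    | nil => simp [expand_with_tokenized_sequence_alt, ewtsCsum, ewtsRef]
    | cons nt nts =>
      simp only [expand_with_tokenized_sequence_alt, List.map_cons, ewtsCsum, ewtsRef, zero_add,
        List.takeWhile]
      by_cases h : (nt.length : Int) ≤ m
      · rw [if_pos h, show (decide ((nt.length:Int) ≤ m)) = true by simpa using h]
        simp only [List.length_cons, List.take_succ_cons, List.zip_cons_cons,
          List.map_cons, List.flatten_cons]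
        congr 1
        rw [ewtsCut_eq (nts.map (·.length)) (nt.length) m]
        have := ih nts (m - nt.length)
        simp only [expand_with_tokenized_sequence_alt] at this
        exact this
      · rw [if_neg h, show (decide ((nt.length:Int) ≤ m)) = false by simpa using h]
        simp

-- ===== VERDICT (by name: the statement is the Claim_ definition above) =====
theorem expand_with_tokenized_sequence_spec : Claim_equal_expand_with_tokenized_sequence := by
  intro tensor nested_tokens max_len _ _
  unfold Spec_expand_with_tokenized_sequence expand_with_tokenized_sequence
  rw [ewtsLoopA_eq_ref, ewtsAlt_eq_ref]
  congr 1
  omega
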